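-- pv_equiv track=rewrite | github.com/pc099/AOC | jira_bot/bot.py | _strip_agent_metadata
-- ===== SOURCE A (Python) =====
-- def _strip_agent_metadata(body: str) -> str:
--     lines = body.splitlines()
--     filtered: list[str] = []
--     skipping_header = True
--     for line in lines:
--         if skipping_header and (line.startswith("[jira-bot-") or line.startswith("source-comment-id:")):
--             continue
--         if skipping_header and not line.strip():
--             continue
--         skipping_header = False
--         filtered.append(line)
--     return "\n".join(filtered).strip()
-- ===== SOURCE B (Python) =====
-- def _normalize_newlines(body: str) -> str:
--     out = []
--     i = 0
--     n = len(body)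
--     while i < n:
--         c = body[i]
--         if c == "\r":
--             out.append("\n")
--             if i + 1 < n and body[i + 1] == "\n":
--                 i += 1
--         else:
--             out.append(c)
--         i += 1
--     return "".join(out)
--
--
-- def _strip_agent_metadata(body: str) -> str:
--     # Work on the raw string: normalize newlines once, then chop leading
--     # metadata/blank lines off the front by slicing at the first "\n";
--     # no line list is ever built.
--     s = _normalize_newlines(body)
--     while s:
--         nl = s.find("\n")
--         if nl < 0:
--             line, rest = s, ""
--         else:
--             line, rest = s[:nl], s[nl + 1:]
--         if (line.startswith("[jira-bot-")
--                 or line.startswith("source-comment-id:")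
--                 or not line.strip()):
--             s = rest
--         else:
--             break
--     return s.strip()
-- ===== Notes on version B (the rewrite author's own statement) =====
-- stated objective: alternative
-- what changed: B never builds a list of lines: it normalizes \r\n/\r to \n in one character pass, then chops leading metadata/blank lines off the raw string by slicing at the first newline, and strips the remaining suffix; A splits into a line list, filters it with a skipping_header flag, and joins it back.
import Mathlib
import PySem

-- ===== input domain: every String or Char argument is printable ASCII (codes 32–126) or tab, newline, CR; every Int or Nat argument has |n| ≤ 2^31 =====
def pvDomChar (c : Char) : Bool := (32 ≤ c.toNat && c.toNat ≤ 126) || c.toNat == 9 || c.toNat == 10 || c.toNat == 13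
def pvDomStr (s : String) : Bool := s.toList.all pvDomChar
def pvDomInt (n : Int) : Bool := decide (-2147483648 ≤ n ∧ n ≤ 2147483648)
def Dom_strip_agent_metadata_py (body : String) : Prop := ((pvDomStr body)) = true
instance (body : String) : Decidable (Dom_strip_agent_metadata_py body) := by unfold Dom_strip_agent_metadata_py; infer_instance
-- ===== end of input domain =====

-- B never builds a list of lines: it normalizes newlines once, then chops leading
-- metadata/blank lines off the raw string by slicing at the first "\n" (alternative
-- decomposition; same asymptotic cost).

-- ===== PORT A =====
-- the body of A's for-loop, as a fold step over (filtered, skipping_header)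
def stripAM_step (st : List String × Bool) (line : String) : List String × Bool :=
  if st.2 && (PySem.Str.startswith line "[jira-bot-" || PySem.Str.startswith line "source-comment-id:") then
    st
  else if st.2 && !(PySem.Str.strip line != "") then
    st
  else
    (st.1 ++ [line], false)

def strip_agent_metadata_py (body : String) : String :=
  let lines := PySem.Str.splitlines body
  let st := lines.foldl stripAM_step ([], true)
  PySem.Str.strip (PySem.Str.join "\n" st.1)

-- ===== PORT B =====
-- Source B's _normalize_newlines: char-by-char, "\r\n" and "\r" both become "\n"
def normChars : List Char → List Char
  | [] => []
  | '\r' :: '\n' :: t => '\n' :: normChars t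
  | '\r' :: t => '\n' :: normChars t
  | c :: t => c :: normChars t

-- the header test of Source B's while-loop
def chopIsMeta (line : List Char) : Bool :=
  PySem.Chars.startswith line "[jira-bot-".toList ||
    PySem.Chars.startswith line "source-comment-id:".toList ||
    (PySem.Chars.strip line).isEmpty

-- Source B's while-loop: nl = s.find("\n"); line = s[:nl], rest = s[nl+1:]
-- (exactly takeWhile (≠ '\n') / dropWhile + drop 1; nl < 0 gives rest = "")
def chopMeta : List Char → List Char
  | [] => []
  | a :: l =>
    let line := (a :: l).takeWhile (fun c => decide (c ≠ '\n'))
    let rest := ((a :: l).dropWhile (fun c => decide (c ≠ '\n'))).drop 1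
    if chopIsMeta line then chopMeta rest else a :: l
termination_by s => s.length
decreasing_by
  have := List.length_dropWhile_le (fun c => decide (c ≠ '\n')) (a :: l)
  simp only [List.length_drop, List.length_cons] at *
  omega

def strip_agent_metadata_py_alt (body : String) : String :=
  String.ofList (PySem.Chars.strip (chopMeta (normChars body.toList)))

-- ===== PRECONDITION & SPEC =====
def Spec_strip_agent_metadata_py (body : String) (out : String) : Prop := out = strip_agent_metadata_py_alt body
instance (body : String) (out : String) : Decidable (Spec_strip_agent_metadata_py body out) := by unfold Spec_strip_agent_metadata_py; infer_instance

-- ===== CLAIM (what is proved, stated in full; the proofs are below) =====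
def Claim_equal_strip_agent_metadata_py : Prop := ∀ (body : String), Dom_strip_agent_metadata_py body → Spec_strip_agent_metadata_py body (strip_agent_metadata_py body)

-- ===== LEMMAS AND PROOFS =====

-- the break-character test hidden inside PySem.Chars.splitlines
def isB0 (c : Char) : Bool :=
  decide (c.toNat = 10) || decide (c.toNat = 13) || decide (c.toNat = 11) || decide (c.toNat = 12) ||
    decide (c.toNat = 28) || decide (c.toNat = 29) || decide (c.toNat = 30) || decide (c.toNat = 133) ||
    decide (c.toNat = 8232) || decide (c.toNat = 8233)

-- "only '\n' can break here": what Dom + normalization guarantee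
def nlOnly (s : List Char) : Prop := ∀ c ∈ s, isB0 c = true → c = '\n'

lemma splitlines_eq_go (s : List Char) :
    PySem.Chars.splitlines s = PySem.Chars.splitlines.go isB0 s [] [] := rfl

lemma go_nil (isB : Char → Bool) (cur acc) : PySem.Chars.splitlines.go isB [] cur acc =
    (if cur.isEmpty then acc.reverse else (cur.reverse :: acc).reverse) := by
  simp [PySem.Chars.splitlines.go]

lemma go_crlf (isB : Char → Bool) (rest cur acc) :
    PySem.Chars.splitlines.go isB ('\r' :: '\n' :: rest) cur acc =
    PySem.Chars.splitlines.go isB rest [] (cur.reverse :: acc) := by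
  simp [PySem.Chars.splitlines.go]

lemma go_break (isB : Char → Bool) (c : Char) (rest cur acc) (hc : c ≠ '\r') (hB : isB c = true) :
    PySem.Chars.splitlines.go isB (c :: rest) cur acc =
    PySem.Chars.splitlines.go isB rest [] (cur.reverse :: acc) := by
  cases rest <;> rw [PySem.Chars.splitlines.go] <;> simp_all [PySem.Chars.splitlines.go]

lemma go_char (isB : Char → Bool) (c : Char) (rest cur acc) (hc : c ≠ '\r') (hB : isB c = false) :
    PySem.Chars.splitlines.go isB (c :: rest) cur acc =
    PySem.Chars.splitlines.go isB rest (c :: cur) acc := by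
  cases rest <;> rw [PySem.Chars.splitlines.go] <;> simp_all [PySem.Chars.splitlines.go]

lemma go_cr (isB : Char → Bool) (rest cur acc) (h : rest.head? ≠ some '\n') (hB : isB '\r' = true) :
    PySem.Chars.splitlines.go isB ('\r' :: rest) cur acc =
    PySem.Chars.splitlines.go isB rest [] (cur.reverse :: acc) := by
  cases rest <;> rw [PySem.Chars.splitlines.go] <;> simp_all [PySem.Chars.splitlines.go]

lemma ne_cr_of_isB0_false {c : Char} (h : isB0 c = false) : c ≠ '\r' := by
  rintro rfl; simp [isB0] at h

lemma char_eq_of_toNat {c : Char} {d : Char} (h : c.toNat = d.toNat) : c = d := by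
  have h1 := Char.ofNat_toNat c
  have h2 := Char.ofNat_toNat d
  rw [h] at h1
  exact h1.symm.trans h2

-- splitlines ignores the normalization of "\r\n"/"\r" to "\n"
lemma norm_go (s : List Char) : ∀ cur acc,
    PySem.Chars.splitlines.go isB0 s cur acc =
    PySem.Chars.splitlines.go isB0 (normChars s) cur acc := by
  induction s using normChars.induct with
  | case1 => intro cur acc; rfl
  | case2 t ih =>
    intro cur acc
    rw [normChars, go_crlf, go_break isB0 '\n' _ _ _ (by decide) (by decide), ih]
  | case3 t hne ih =>
    intro cur acc
    have hh : t.head? ≠ some '\n' := by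
      cases t with
      | nil => simp
      | cons d t' =>
        intro hd
        have hd' : d = '\n' := by simpa using hd
        exact hne t' (by rw [hd'])
    have hnc : normChars ('\r' :: t) = '\n' :: normChars t := by
      cases t with
      | nil => rfl
      | cons d t' =>
        simp [normChars]
    rw [go_cr isB0 t cur acc hh (by decide), hnc,
        go_break isB0 '\n' _ _ _ (by decide) (by decide), ih]
  | case4 c t hc1 hc2 ih =>
    intro cur acc
    have hc : c ≠ '\r' := hc2
    have hnc : normChars (c :: t) = c :: normChars t := by
      cases t with
      | nil => simp [normChars]
      | cons d t' => simp [normChars]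
    cases hB : isB0 c with
    | true =>
      rw [go_break isB0 c _ _ _ hc hB, hnc, go_break isB0 c _ _ _ hc hB, ih]
    | false =>
      rw [go_char isB0 c _ _ _ hc hB, hnc, go_char isB0 c _ _ _ hc hB, ih]

lemma norm_no_cr (s : List Char) : '\r' ∉ normChars s := by
  induction s using normChars.induct with
  | case1 => simp [normChars]
  | case2 t ih => simp [normChars, ih]
  | case3 t hne ih =>
    have hnc : normChars ('\r' :: t) = '\n' :: normChars t := by
      cases t with
      | nil => rfl
      | cons d t' =>
        simp [normChars]
    simp [hnc, ih]
  | case4 c t hc1 hc2 ih =>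
    have hc : c ≠ '\r' := hc2
    have hnc : normChars (c :: t) = c :: normChars t := by
      cases t with
      | nil => simp [normChars]
      | cons d t' => simp [normChars]
    simp only [hnc, List.mem_cons, not_or]
    exact ⟨fun h => hc h.symm, ih⟩

lemma norm_mem {s : List Char} {c : Char} (h : c ∈ normChars s) : c = '\n' ∨ c ∈ s := by
  induction s using normChars.induct with
  | case1 => simp [normChars] at h
  | case2 t ih =>
    simp only [normChars, List.mem_cons] at h
    rcases h with h | h
    · exact Or.inl h
    · rcases ih h with h | h
      · exact Or.inl h
      · exact Or.inr (by simp [h])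
  | case3 t hne ih =>
    have hnc : normChars ('\r' :: t) = '\n' :: normChars t := by
      cases t with
      | nil => rfl
      | cons d t' =>
        simp [normChars]
    rw [hnc] at h
    rcases List.mem_cons.mp h with h | h
    · exact Or.inl h
    · rcases ih h with h | h
      · exact Or.inl h
      · exact Or.inr (by simp [h])
  | case4 c' t hc1 hc2 ih =>
    have hc : c' ≠ '\r' := hc2
    have hnc : normChars (c' :: t) = c' :: normChars t := by
      cases t with
      | nil => simp [normChars]
      | cons d t' => simp [normChars]
    rw [hnc] at h
    rcases List.mem_cons.mp h with h | h
    · exact Or.inr (by simp [h])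
    · rcases ih h with h | h
      · exact Or.inl h
      · exact Or.inr (by simp [h])

lemma norm_nlOnly {s : List Char} (hdom : ∀ c ∈ s, pvDomChar c = true) :
    nlOnly (normChars s) := by
  intro c hc hB
  rcases norm_mem hc with h | h
  · exact h
  · have hd := hdom c h
    have hcr : c ≠ '\r' := fun hrc => norm_no_cr s (hrc ▸ hc)
    have h13 : c.toNat ≠ 13 := fun h13 => hcr (char_eq_of_toNat (d := '\r') (by rw [h13]; rfl))
    have h10 : c.toNat = 10 := by
      simp [pvDomChar] at hd
      simp [isB0] at hB
      omega
    exact char_eq_of_toNat (d := '\n') (by rw [h10]; rfl)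

-- accumulated output is a prefix of the result
lemma go_acc (s : List Char) (hnl : nlOnly s) : ∀ cur acc,
    PySem.Chars.splitlines.go isB0 s cur acc =
    acc.reverse ++ PySem.Chars.splitlines.go isB0 s cur [] := by
  induction s with
  | nil => intro cur acc; cases cur <;> simp [go_nil]
  | cons c t ih =>
    have hnt : nlOnly t := fun d hd => hnl d (List.mem_cons_of_mem _ hd)
    intro cur acc
    cases hB : isB0 c with
    | true =>
      have hc := hnl c (List.mem_cons_self) hB
      subst hc
      rw [go_break isB0 '\n' _ _ _ (by decide) (by decide),
          go_break isB0 '\n' _ _ _ (by decide) (by decide),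
          ih hnt [] (cur.reverse :: acc), ih hnt [] [cur.reverse]]
      simp
    | false =>
      rw [go_char isB0 c _ _ _ (ne_cr_of_isB0_false hB) hB,
          go_char isB0 c _ _ _ (ne_cr_of_isB0_false hB) hB, ih hnt]

-- a break-free segment just accumulates
lemma go_seg (line : List Char) (hline : ∀ c ∈ line, isB0 c = false) : ∀ s cur acc,
    PySem.Chars.splitlines.go isB0 (line ++ s) cur acc =
    PySem.Chars.splitlines.go isB0 s (line.reverse ++ cur) acc := by
  induction line with
  | nil => intro s cur acc; simp
  | cons c t ih =>
    intro s cur acc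
    have hc := hline c List.mem_cons_self
    rw [List.cons_append, go_char isB0 c _ _ _ (ne_cr_of_isB0_false hc) hc,
        ih (fun d hd => hline d (List.mem_cons_of_mem _ hd))]
    simp

lemma sl_plain (line : List Char) (hline : ∀ c ∈ line, isB0 c = false) (hne : line ≠ []) :
    PySem.Chars.splitlines line = [line] := by
  rw [splitlines_eq_go, show line = line ++ [] by simp, go_seg line hline [] [] [], go_nil]
  simp [hne]

lemma sl_break (line rest : List Char) (hline : ∀ c ∈ line, isB0 c = false) (hnl : nlOnly rest) :
    PySem.Chars.splitlines (line ++ '\n' :: rest) = line :: PySem.Chars.splitlines rest := by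
  rw [splitlines_eq_go, go_seg line hline _ [] [],
      go_break isB0 '\n' _ _ _ (by decide) (by decide), go_acc rest hnl, splitlines_eq_go]
  simp

-- one trailing '\n' does not survive strip
lemma strip_append_nl (x : List Char) :
    PySem.Chars.strip (x ++ ['\n']) = PySem.Chars.strip x := by
  unfold PySem.Chars.strip PySem.Chars.rstrip PySem.Chars.lstrip
  rw [List.dropWhile_append]
  by_cases h : (List.dropWhile PySem.Chars.isspace x).isEmpty
  · have hx : List.dropWhile PySem.Chars.isspace x = [] := by simpa using h
    simp [hx, (by decide : PySem.Chars.isspace '\n' = true)]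
  · simp only [h, if_false, Bool.false_eq_true, List.reverse_append]
    simp [(by decide : PySem.Chars.isspace '\n' = true)]

lemma dropWhile_head_false {α : Type} {p : α → Bool} {l : List α} {d : α} {rest : List α}
    (h : l.dropWhile p = d :: rest) : p d = false := by
  induction l with
  | nil => simp at h
  | cons a t ih =>
    rw [List.dropWhile_cons] at h
    by_cases hp : p a
    · rw [if_pos hp] at h
      exact ih h
    · rw [if_neg hp] at h
      cases h
      simpa using hp

-- every nonempty nl-only string is a break-free segment, alone or before '\n'
lemma decomp (s : List Char) (hnl : nlOnly s) (_hs : s ≠ []) :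
    ((∀ c ∈ s, isB0 c = false) ∧ s.takeWhile (fun c => decide (c ≠ '\n')) = s ∧
      s.dropWhile (fun c => decide (c ≠ '\n')) = []) ∨
    ∃ line rest, s = line ++ '\n' :: rest ∧ (∀ c ∈ line, isB0 c = false) ∧
      s.takeWhile (fun c => decide (c ≠ '\n')) = line ∧
      s.dropWhile (fun c => decide (c ≠ '\n')) = '\n' :: rest := by
  have hline : ∀ c ∈ s.takeWhile (fun c => decide (c ≠ '\n')), isB0 c = false := by
    intro c hc
    have hp : c ≠ '\n' := by simpa using List.mem_takeWhile_imp hc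
    by_contra hB
    exact hp (hnl c ((List.takeWhile_prefix _).subset hc) (by simpa using hB))
  cases hr : s.dropWhile (fun c => decide (c ≠ '\n')) with
  | nil =>
    left
    have ht : s.takeWhile (fun c => decide (c ≠ '\n')) = s := by
      conv_rhs => rw [← List.takeWhile_append_dropWhile
        (p := fun c => decide (c ≠ '\n')) (l := s)]
      rw [hr, List.append_nil]
    exact ⟨fun c hc => hline c (by rw [ht]; exact hc), ht, rfl⟩
  | cons d rest =>
    right
    have hd : d = '\n' := by
      have := dropWhile_head_false hr
      simpa using this
    subst hd
    refine ⟨s.takeWhile (fun c => decide (c ≠ '\n')), rest, ?_, hline, rfl, rfl⟩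
    conv_lhs => rw [← List.takeWhile_append_dropWhile
      (p := fun c => decide (c ≠ '\n')) (l := s)]
    rw [hr]

lemma nlOnly_suffix {line rest : List Char} (hnl : nlOnly (line ++ '\n' :: rest)) :
    nlOnly rest :=
  fun c hc hB => hnl c (by simp [hc]) hB

-- join ∘ splitlines restores the string up to one trailing '\n'
lemma join_splitlines (n : Nat) : ∀ s : List Char, s.length ≤ n → nlOnly s →
    PySem.Chars.join ['\n'] (PySem.Chars.splitlines s) = s ∨
    PySem.Chars.join ['\n'] (PySem.Chars.splitlines s) ++ ['\n'] = s := by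
  induction n with
  | zero =>
    intro s hlen _
    have : s = [] := List.length_eq_zero_iff.mp (Nat.le_zero.mp hlen)
    subst this
    left
    decide
  | succ n ih =>
    intro s hlen hnl
    by_cases hs : s = []
    · subst hs; left; decide
    rcases decomp s hnl hs with ⟨hall, _, _⟩ | ⟨line, rest, hseq, hline, _, _⟩
    · left
      rw [sl_plain s hall hs, PySem.Chars.join_singleton]
    · subst hseq
      have hrnl : nlOnly rest := nlOnly_suffix hnl
      have hrlen : rest.length ≤ n := by
        have := congrArg List.length (rfl : line ++ '\n' :: rest = line ++ '\n' :: rest)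
        simp only [List.length_append, List.length_cons] at hlen ⊢
        omega
      rw [sl_break line rest hline hrnl]
      cases hL : PySem.Chars.splitlines rest with
      | nil =>
        rcases ih rest hrlen hrnl with hj | hj <;> rw [hL] at hj
        · have : rest = [] := by simpa [PySem.Chars.join_nil] using hj.symm
          subst this
          right
          rw [PySem.Chars.join_singleton]
        · have : rest = ['\n'] := by
            have : PySem.Chars.join ['\n'] [] ++ ['\n'] = rest := hj
            simpa [PySem.Chars.join_nil] using this.symm
          rw [this] at hL
          exact absurd hL (by decide)
      | cons l0 L =>
        rcases ih rest hrlen hrnl with hj | hj <;> rw [hL] at hj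
        · left
          rw [PySem.Chars.join_cons_cons, hj]
          simp
        · right
          rw [PySem.Chars.join_cons_cons]
          rw [← hj]
          simp


lemma strip_join_splitlines {s : List Char} (hnl : nlOnly s) :
    PySem.Chars.strip (PySem.Chars.join ['\n'] (PySem.Chars.splitlines s)) =
    PySem.Chars.strip s := by
  rcases join_splitlines s.length s le_rfl hnl with h | h
  · rw [h]
  · conv_rhs => rw [← h]
    rw [strip_append_nl]

-- chop = dropWhile on the split lines, up to strip
lemma chop_eq (n : Nat) : ∀ s : List Char, s.length ≤ n → nlOnly s →
    PySem.Chars.strip (chopMeta s) =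
    PySem.Chars.strip (PySem.Chars.join ['\n']
      ((PySem.Chars.splitlines s).dropWhile chopIsMeta)) := by
  induction n with
  | zero =>
    intro s hlen _
    have : s = [] := List.length_eq_zero_iff.mp (Nat.le_zero.mp hlen)
    subst this
    rw [chopMeta]
    decide
  | succ n ih =>
    intro s hlen hnl
    by_cases hs : s = []
    · subst hs
      rw [chopMeta]
      decide
    obtain ⟨a, l, rfl⟩ : ∃ a l, s = a :: l := by
      cases s with
      | nil => exact absurd rfl hs
      | cons a l => exact ⟨a, l, rfl⟩
    rcases decomp (a :: l) hnl hs with ⟨hall, htake, hdrop⟩ |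
      ⟨line, rest, hseq, hline, htake, hdrop⟩
    · rw [chopMeta, htake, hdrop, sl_plain (a :: l) hall hs]
      cases hm : chopIsMeta (a :: l) with
      | true => simp [hm, PySem.Chars.join_nil, chopMeta]
      | false => simp [hm, PySem.Chars.join_singleton]
    · have hrnl : nlOnly rest := nlOnly_suffix (hseq ▸ hnl)
      have hrlen : rest.length ≤ n := by
        have h1 := congrArg List.length hseq
        simp only [List.length_append, List.length_cons] at h1 hlen
        omega
      rw [chopMeta, htake, hdrop]
      simp only [List.drop_succ_cons, List.drop_zero]
      rw [hseq, sl_break line rest hline hrnl]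
      cases hm : chopIsMeta line with
      | true =>
        simp only [hm, if_true, List.dropWhile_cons, ← hseq]
        exact ih rest hrlen hrnl
      | false =>
        simp only [hm, if_false, Bool.false_eq_true, List.dropWhile_cons]
        rw [← sl_break line rest hline hrnl, ← hseq,
          strip_join_splitlines hnl]

-- ===== A-side: the flag fold is join ∘ dropWhile ∘ splitlines =====
def stripAM_isMeta (line : String) : Bool :=
  PySem.Str.startswith line "[jira-bot-" || PySem.Str.startswith line "source-comment-id:" ||
    PySem.Str.strip line == ""

lemma stripAM_foldl_false (lines : List String) (acc : List String) :
    lines.foldl stripAM_step (acc, false) = (acc ++ lines, false) := by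
  induction lines generalizing acc with
  | nil => simp
  | cons l ls ih => simp [stripAM_step, ih]

lemma stripAM_step_true (acc : List String) (l : String) :
    stripAM_step (acc, true) l =
      if stripAM_isMeta l then (acc, true) else (acc ++ [l], false) := by
  unfold stripAM_step stripAM_isMeta
  cases hs : PySem.Str.startswith l "[jira-bot-" <;>
    cases ht : PySem.Str.startswith l "source-comment-id:" <;>
      cases hb : PySem.Str.strip l == "" <;>
        simp_all [bne]

lemma stripAM_foldl_true (lines : List String) (acc : List String) :
    (lines.foldl stripAM_step (acc, true)).1 = acc ++ lines.dropWhile stripAM_isMeta := by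
  induction lines generalizing acc with
  | nil => simp
  | cons l ls ih =>
    cases h : stripAM_isMeta l
    · simp [List.foldl_cons, stripAM_step_true, h, stripAM_foldl_false]
    · simp [List.foldl_cons, stripAM_step_true, h, ih]

lemma beq_empty_eq_isEmpty (s : String) : (s == "") = s.toList.isEmpty := by
  by_cases h : s = ""
  · subst h; rfl
  · have hne : s.toList ≠ [] := fun hc => h (String.toList_inj.mp (by simp [hc]))
    rw [List.isEmpty_eq_false_iff.mpr hne]
    exact beq_eq_false_iff_ne.mpr h

lemma meta_bridge (l : String) : stripAM_isMeta l = chopIsMeta l.toList := by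
  simp only [stripAM_isMeta, chopIsMeta, PySem.Str.startswith_eq]
  congr 1
  rw [← PySem.Str.toList_strip, ← beq_empty_eq_isEmpty]

-- ===== VERDICT (by name: the statement is the Claim_ definition above) =====
theorem strip_agent_metadata_py_spec : Claim_equal_strip_agent_metadata_py := by
  intro body hdom
  show strip_agent_metadata_py body = strip_agent_metadata_py_alt body
  have hnl : nlOnly (normChars body.toList) :=
    norm_nlOnly (by
      intro c hc
      have := hdom
      unfold Dom_strip_agent_metadata_py pvDomStr at this
      exact List.all_eq_true.mp this c hc)
  apply String.toList_inj.mp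
  simp only [strip_agent_metadata_py, strip_agent_metadata_py_alt]
  rw [stripAM_foldl_true, List.nil_append, String.toList_ofList,
      PySem.Str.toList_strip, PySem.Str.toList_join]
  have hpred : stripAM_isMeta = chopIsMeta ∘ String.toList := funext meta_bridge
  rw [hpred, ← List.dropWhile_map, PySem.Str.splitlines_map_toList,
      splitlines_eq_go body.toList, norm_go body.toList, ← splitlines_eq_go]
  simp only [show ("\n" : String).toList = ['\n'] from rfl]
  rw [← chop_eq (normChars body.toList).length _ le_rfl hnl]
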